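-- pv_equiv track=rewrite | github.com/hghyhghy/Codechef-Coding-Ninja | Desktop/DSA/T59/9.py | twin_pairs
-- ===== SOURCE A (Python) =====
-- def twin_pairs(array):
--
--     n=len(array)
--     count  =0
--
--     for i in range(n):
--
--         for j in range(i+1,n):
--
--             if (array[j]-array[i]) == j-i:
--
--                 count +=1
--
--     return count
-- ===== SOURCE B (Python) =====
-- def twin_pairs(array):
--     counts = {}
--     total = 0
--     for k, v in enumerate(array):
--         d = v - k
--         c = counts.get(d, 0)
--         total += c
--         counts[d] = c + 1
--     return total
-- ===== Notes on version B (the rewrite author's own statement) =====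
-- stated objective: faster
-- what changed: Replaced the quadratic double loop over index pairs by a single pass that counts, via a hash map keyed by array[k]-k, how many earlier elements share the same key (array[j]-array[i]==j-i iff array[j]-j==array[i]-i).
import Mathlib
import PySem

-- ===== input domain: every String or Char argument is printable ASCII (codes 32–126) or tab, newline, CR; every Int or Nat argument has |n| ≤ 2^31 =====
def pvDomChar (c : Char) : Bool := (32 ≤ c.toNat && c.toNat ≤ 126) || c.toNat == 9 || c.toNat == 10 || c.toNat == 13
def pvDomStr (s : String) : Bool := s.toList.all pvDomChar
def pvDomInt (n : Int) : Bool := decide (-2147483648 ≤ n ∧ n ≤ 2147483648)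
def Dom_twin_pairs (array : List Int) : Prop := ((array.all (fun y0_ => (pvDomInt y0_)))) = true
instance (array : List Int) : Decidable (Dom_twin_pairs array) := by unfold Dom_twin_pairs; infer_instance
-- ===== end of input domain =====

-- B replaces A's quadratic double loop by one pass counting equal values of array[k]-k (asymptotically faster).

-- ===== PORT A =====
def twin_pairs (array : List Int) : Int :=
  let n : Int := array.length
  (PySem.List.pyRange 0 n 1).foldl (fun count i =>
    (PySem.List.pyRange (i + 1) n 1).foldl (fun count j =>
      if PySem.List.pyGetD array j 0 - PySem.List.pyGetD array i 0 = j - i then count + 1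
      else count) count) 0

-- ===== PORT B =====
def twin_pairs_alt (array : List Int) : Int :=
  ((PySem.List.enumerate array 0).foldl
    (fun (st : PySem.Dict Int Int × Int) kv =>
      let d := kv.2 - kv.1
      let c := st.1.getD d 0
      (st.1.insert d (c + 1), st.2 + c))
    (PySem.Dict.empty, 0)).2

-- ===== PRECONDITION & SPEC =====
def Spec_twin_pairs (array : List Int) (out : Int) : Prop := out = twin_pairs_alt array
instance (array : List Int) (out : Int) : Decidable (Spec_twin_pairs array out) := by unfold Spec_twin_pairs; infer_instance

-- ===== CLAIM (what is proved, stated in full; the proofs are below) =====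
def Claim_equal_twin_pairs : Prop := ∀ (array : List Int), Dom_twin_pairs array → Spec_twin_pairs array (twin_pairs array)

-- ===== LEMMAS AND PROOFS =====

-- the list of values array[k] - k (starting index k)
def pvDiffs : List Int → Int → List Int
  | [], _ => []
  | x :: xs, k => (x - k) :: pvDiffs xs (k + 1)

-- number of pairs i < j with l[i] = l[j], summed "per left endpoint"
def pvF : List Int → Int
  | [] => 0
  | x :: xs => (xs.count x : Int) + pvF xs

-- same pairs summed "per right endpoint", given an already-processed prefix p
def pvG (p l : List Int) : Int :=
  match l with
  | [] => 0
  | x :: t => (p.count x : Int) + pvG (p ++ [x]) t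

theorem pvDiffs_length (l : List Int) (k : Int) : (pvDiffs l k).length = l.length := by
  induction l generalizing k with
  | nil => rfl
  | cons x xs ih => simp [pvDiffs, ih]

theorem pvDiffs_getElem (l : List Int) (k : Int) (i : Nat) (h : i < l.length) :
    (pvDiffs l k)[i]'(by rw [pvDiffs_length]; exact h) = l[i] - (k + i) := by
  induction l generalizing k i with
  | nil => simp at h
  | cons x xs ih =>
    cases i with
    | zero => simp [pvDiffs]
    | succ m =>
      simp only [pvDiffs, List.getElem_cons_succ]
      rw [ih (k + 1) m (by simpa using h)]
      push_cast; ring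

theorem foldl_if_count (l : List Int) (v : Int) (c : Int) :
    l.foldl (fun c x => if x = v then c + 1 else c) c = c + (l.count v : Int) := by
  induction l generalizing c with
  | nil => simp
  | cons x xs ih =>
    by_cases hx : x = v <;> simp [List.count_cons, hx, ih] <;> push_cast <;> ring

theorem pvF_concat (l : List Int) (x : Int) :
    pvF (l ++ [x]) = pvF l + (l.count x : Int) := by
  induction l with
  | nil => simp [pvF]
  | cons y t ih =>
    simp only [List.cons_append, pvF, ih, List.count_cons]
    by_cases h : y = x
    · simp [h, List.count_append, List.count_cons]; push_cast; ring
    · have h' : ¬x = y := fun e => h e.symm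
      simp [h, h', List.count_append, List.count_cons]; push_cast; ring

theorem pvG_pvF (l p : List Int) : pvG p l + pvF p = pvF (p ++ l) := by
  induction l generalizing p with
  | nil => simp [pvG]
  | cons x t ih =>
    have h1 : p ++ x :: t = (p ++ [x]) ++ t := by simp
    rw [h1, ← ih (p ++ [x]), pvF_concat]
    simp [pvG]; ring

-- ===== A equals pvF (pvDiffs array 0) =====

theorem inner_loop_eq (ds : List Int) (a : Int) (ha : 0 ≤ a) (v c : Int) :
    (PySem.List.pyRange a (ds.length : Int) 1).foldl
      (fun c j => if PySem.List.pyGetD ds j 0 = v then c + 1 else c) c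
      = c + ((ds.drop a.toNat).count v : Int) := by
  rw [PySem.List.foldl_pyRange_pyGetD' ds 0 (fun c x => if x = v then c + 1 else c) c ha]
  exact foldl_if_count _ _ _

theorem outer_loop_eq (m : Nat) (l : List Int) (a : Int) (ha : 0 ≤ a)
    (hm : a.toNat + m = l.length) (c : Int) :
    (PySem.List.pyRange a (l.length : Int) 1).foldl
      (fun c i => c + (((l.drop (i + 1).toNat).count (PySem.List.pyGetD l i 0)) : Int)) c
      = c + pvF (l.drop a.toNat) := by
  induction m generalizing a c with
  | zero =>
    rw [PySem.List.pyRange_one_eq_nil (by omega)]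
    simp [List.drop_eq_nil_of_le (by omega : l.length ≤ a.toNat), pvF]
  | succ m ih =>
    have hlt : a < (l.length : Int) := by omega
    rw [PySem.List.pyRange_one_cons hlt]
    simp only [List.foldl_cons]
    rw [ih (a + 1) (by omega) (by omega)]
    have hai : a.toNat < l.length := by omega
    have hdrop : l.drop a.toNat = l[a.toNat] :: l.drop (a.toNat + 1) :=
      (List.drop_eq_getElem_cons hai)
    have hget : PySem.List.pyGetD l a 0 = l[a.toNat] :=
      PySem.List.pyGetD_eq_getElem l 0 ha (by simpa using hlt)
    have htn : (a + 1).toNat = a.toNat + 1 := by omega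
    rw [hget, htn, hdrop]
    simp [pvF]
    ring

theorem twin_pairs_eq_pvF (array : List Int) :
    twin_pairs array = pvF (pvDiffs array 0) := by
  unfold twin_pairs
  set ds := pvDiffs array 0 with hds
  have hlen : ds.length = array.length := by rw [hds]; exact pvDiffs_length _ _
  have hget : ∀ (j : Int), 0 ≤ j → j < (array.length : Int) →
      PySem.List.pyGetD array j 0 - j = PySem.List.pyGetD ds j 0 := by
    intro j h0 hj
    have hj' : j.toNat < array.length := by omega
    rw [PySem.List.pyGetD_eq_getElem array 0 h0 (by simpa using hj),
        PySem.List.pyGetD_eq_getElem ds 0 h0 (by simp [hlen]; omega)]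
    have h2 : ds[j.toNat]'(by rw [hds, pvDiffs_length]; exact hj') = array[j.toNat] - (0 + (j.toNat : Int)) := by
      simp only [hds]; exact pvDiffs_getElem array 0 j.toNat hj'
    rw [h2]
    omega
  rw [PySem.List.foldl_congr_mem (g := fun c i =>
      c + (((ds.drop (i + 1).toNat).count (PySem.List.pyGetD ds i 0)) : Int))]
  · rw [← hlen]
    simpa using outer_loop_eq ds.length ds 0 le_rfl (by simp) 0
  · intro c i hi
    rw [PySem.List.mem_pyRange_one] at hi
    obtain ⟨h0, hn⟩ := hi
    rw [PySem.List.foldl_congr_mem (g := fun c j =>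
        if PySem.List.pyGetD ds j 0 = PySem.List.pyGetD ds i 0 then c + 1 else c)]
    · rw [← hlen]
      exact inner_loop_eq ds (i + 1) (by omega) _ c
    · intro c' j hj
      rw [PySem.List.mem_pyRange_one] at hj
      obtain ⟨hj0, hjn⟩ := hj
      have e1 := hget j (by omega) (by omega)
      have e2 := hget i h0 hn
      have : (PySem.List.pyGetD array j 0 - PySem.List.pyGetD array i 0 = j - i)
           ↔ (PySem.List.pyGetD ds j 0 = PySem.List.pyGetD ds i 0) := by omega
      simp only [this]

-- ===== B equals pvF (pvDiffs array 0) =====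

def pvStep (st : PySem.Dict Int Int × Int) (d : Int) : PySem.Dict Int Int × Int :=
  (st.1.insert d (st.1.getD d 0 + 1), st.2 + st.1.getD d 0)

theorem enum_fold_eq (arr : List Int) (k : Int) (st : PySem.Dict Int Int × Int) :
    (PySem.List.enumerate arr k).foldl
      (fun (st : PySem.Dict Int Int × Int) kv =>
        let d := kv.2 - kv.1
        let c := st.1.getD d 0
        (st.1.insert d (c + 1), st.2 + c)) st
      = (pvDiffs arr k).foldl pvStep st := by
  induction arr generalizing k st with
  | nil => simp [pvDiffs]
  | cons x xs ih => simp [PySem.List.enumerate_cons, pvDiffs, pvStep, ih]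

theorem step_fold_eq (l : List Int) (D : PySem.Dict Int Int) (t : Int) (p : List Int)
    (hinv : ∀ d, D.getD d 0 = (p.count d : Int)) :
    (l.foldl pvStep (D, t)).2 = t + pvG p l := by
  induction l generalizing D t p with
  | nil => simp [pvG]
  | cons x xs ih =>
    simp only [List.foldl_cons, pvStep]
    rw [ih (D.insert x (D.getD x 0 + 1)) (t + D.getD x 0) (p ++ [x])
      (by
        intro d
        rw [PySem.Dict.getD_insert]
        by_cases h : d = x <;>
          simp [h, hinv, List.count_append, List.count_singleton] <;> push_cast <;> omega)]
    rw [hinv x]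
    simp [pvG]; ring

theorem twin_pairs_alt_eq_pvF (array : List Int) :
    twin_pairs_alt array = pvF (pvDiffs array 0) := by
  unfold twin_pairs_alt
  rw [enum_fold_eq, step_fold_eq (p := []) (hinv := by intro d; simp)]
  have := pvG_pvF (pvDiffs array 0) []
  simp [pvF] at this
  simpa using this

-- ===== VERDICT (by name: the statement is the Claim_ definition above) =====
theorem twin_pairs_spec : Claim_equal_twin_pairs := by
  intro array _
  unfold Spec_twin_pairs
  rw [twin_pairs_eq_pvF, twin_pairs_alt_eq_pvF]
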